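-- pv_equiv track=rewrite | github.com/CensoredBear/VSEP_EXCHANGER_BOT | help_menu.py | build_pretty_help_text
-- ===== SOURCE A (Python) =====
-- def build_pretty_help_text(status):
--     """Сформировать красивый help-текст с разделами по статусу пользователя"""
--     sections = [
--         ("user", "<u><b>🙋‍♂️ для менеджера Клиента:</b></u>\n"
--                  "✦ <code>/СУММА</code> - запрос суммы для обмена\n"
--                  "<blockquote>примеры:\n"
--                  "<code>/1000000</code> - нужно 1 млн IDR - дать расчет и реквизиты для перевода RUB\n"
--                  "<code>/-500000</code> - нужно вернуть 500000 IDR - дать расчет возврата</blockquote>\n"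
--                  "✦ <code>/sos</code> - срочный вызов представителя сервиса\n"
--                  "✦ <code>/control [комментарий при необходимости]</code> - запрос контроля оплаты (с вложением)\n"
--                  "✦ <code>/joke</code> ✦ <code>/meme</code> ✦ <code>/dice</code> ✦ <code>/coin</code> - если будет скучно 😄\n\n"
--                  "✦ <code>/status</code> - просмотр активных запросов\n"
--                  "✦ <code>/report</code> - отчет по всем группам запросов\n"
--                  "✦ <code>/order_show</code> - просмотр информации по отдельной заявке\n"),
--         ("operator", "<u><b>👨‍💻 + для оператора Сервиса:</b></u>\n"
--                      #  "✦ <code>/accept & order_number</code> - отметка о принятии платежа\n"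
--                      "✦ <code>/bank_new</code> - добавить новые реквизиты на обмен\n"
--                      "✦ <code>/bank_show</code> - показать все действующие реквизиты\n"
--                      "✦ <code>/bank_change</code> - сменить текущие или спец реквизиты\n\n"
--                      "✦ <code>/check_control</code> - отчет по количеству запросов на контроле\n"
--                      "✦ <code>/zombie [order_number]</code> - оживить заявку из архива (timeout → created)\n"),
--         ("admin", "<u><b>👨🏻‍💼 + для админа Cервиса:</b></u>\n"
--                   "✦ <code>/transfer [сумма]</code> - подтверждение оплаты ордеров из отчета (с вложением)\n\n"
--                   "✦ <code>/bank_remove</code> - удалить реквизиты навсегда\n"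
--                   "✦ <code>/operator_show</code> - показать всех операторов\n"
--                   "✦ <code>/operator_add</code> - назначить оператора сервиса\n"
--                   "✦ <code>/operator_remove</code> - снять права оператора\n\n"
--                   "✦ <code>/rate_show</code> - показать текущие курсы обмена\n"
--                   "✦ <code>/rate_change</code> - сменить текущий основной курс\n"
--                   "⁴⁰⁴<code>/rate_zone_change</code> - cменить зоны (интервалы) обмена\n"
--                   "⁴⁰⁴<code>/rate_coef_change</code> - сменить текущие коэффициенты курсов\n"
--                   "!!! предельная аккуратность при следующей команде:\n"
--                   "✦ <code>/order_change [order_number]</code> - изменить статус заявки\n"),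
--         ("superadmin", "<u><b>👮 + для супер админа:</b></u>\n"
--                        "✦ <code>/admin_show</code> - показать всех админов сервиса\n"
--                        "✦ <code>/admin_add</code> - добавить админа в сервис\n"
--                        "✦ <code>/admin_remove</code> - удалить админа из сервиса\n"
--                        "✦ <code>/check</code> - информация о чате\n"
--                        "✦ <code>/restart</code> - перезапустить бота\n"
--                        "✦ <code>/worktime</code> - изменить рабочее время смены\n"
--                        "✦ <code>/work_open</code> — принудительно открыть смену\n"
--                        "✦ <code>/work_close</code> — принудительно закрыть смену\n"
--                        "✦ <code>/reset_control</code> — сбросить счетчик контроля для текущего чата\n"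
--                        "✦ <code>/set_media_mbt</code> — установить медиа для MBT (фото/видео)\n"
--                        "✦ <code>/set_media_start</code> — установить медиа для начала смены (фото/видео)\n"
--                        "✦ <code>/set_media_finish</code> — установить медиа для окончания смены (фото/видео)\n"
--                        "✦ <code>/toggle_info_mbt</code> — вкл/выкл инфо-скрипт для MBT\n"
--                        "✦ <code>/toggle_info_lgi</code> — вкл/выкл инфо-скрипт для LGI\n"
--                        "✦ <code>/toggle_info_tct</code> — вкл/выкл инфо-скрипт для TCT\n")
--     ]
--     status_order = ["user", "operator", "admin", "superadmin"]
--     text = "(｡•̀ ᵕ •́｡) Команды, доступные вам:\n\n"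
--     for s, section in sections:
--         text += section + "\n"
--         if s == status:
--             break
--     return text
-- ===== SOURCE B (Python) =====
-- def build_pretty_help_text(status):
--     """Сформировать красивый help-текст с разделами по статусу пользователя"""
--     sections = [
--         ("user", "<u><b>🙋‍♂️ для менеджера Клиента:</b></u>\n"
--                  "✦ <code>/СУММА</code> - запрос суммы для обмена\n"
--                  "<blockquote>примеры:\n"
--                  "<code>/1000000</code> - нужно 1 млн IDR - дать расчет и реквизиты для перевода RUB\n"
--                  "<code>/-500000</code> - нужно вернуть 500000 IDR - дать расчет возврата</blockquote>\n"
--                  "✦ <code>/sos</code> - срочный вызов представителя сервиса\n"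
--                  "✦ <code>/control [комментарий при необходимости]</code> - запрос контроля оплаты (с вложением)\n"
--                  "✦ <code>/joke</code> ✦ <code>/meme</code> ✦ <code>/dice</code> ✦ <code>/coin</code> - если будет скучно 😄\n\n"
--                  "✦ <code>/status</code> - просмотр активных запросов\n"
--                  "✦ <code>/report</code> - отчет по всем группам запросов\n"
--                  "✦ <code>/order_show</code> - просмотр информации по отдельной заявке\n"),
--         ("operator", "<u><b>👨‍💻 + для оператора Сервиса:</b></u>\n"
--                      "✦ <code>/bank_new</code> - добавить новые реквизиты на обмен\n"
--                      "✦ <code>/bank_show</code> - показать все действующие реквизиты\n"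
--                      "✦ <code>/bank_change</code> - сменить текущие или спец реквизиты\n\n"
--                      "✦ <code>/check_control</code> - отчет по количеству запросов на контроле\n"
--                      "✦ <code>/zombie [order_number]</code> - оживить заявку из архива (timeout → created)\n"),
--         ("admin", "<u><b>👨🏻‍💼 + для админа Cервиса:</b></u>\n"
--                   "✦ <code>/transfer [сумма]</code> - подтверждение оплаты ордеров из отчета (с вложением)\n\n"
--                   "✦ <code>/bank_remove</code> - удалить реквизиты навсегда\n"
--                   "✦ <code>/operator_show</code> - показать всех операторов\n"
--                   "✦ <code>/operator_add</code> - назначить оператора сервиса\n"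
--                   "✦ <code>/operator_remove</code> - снять права оператора\n\n"
--                   "✦ <code>/rate_show</code> - показать текущие курсы обмена\n"
--                   "✦ <code>/rate_change</code> - сменить текущий основной курс\n"
--                   "⁴⁰⁴<code>/rate_zone_change</code> - cменить зоны (интервалы) обмена\n"
--                   "⁴⁰⁴<code>/rate_coef_change</code> - сменить текущие коэффициенты курсов\n"
--                   "!!! предельная аккуратность при следующей команде:\n"
--                   "✦ <code>/order_change [order_number]</code> - изменить статус заявки\n"),
--         ("superadmin", "<u><b>👮 + для супер админа:</b></u>\n"
--                        "✦ <code>/admin_show</code> - показать всех админов сервиса\n"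
--                        "✦ <code>/admin_add</code> - добавить админа в сервис\n"
--                        "✦ <code>/admin_remove</code> - удалить админа из сервиса\n"
--                        "✦ <code>/check</code> - информация о чате\n"
--                        "✦ <code>/restart</code> - перезапустить бота\n"
--                        "✦ <code>/worktime</code> - изменить рабочее время смены\n"
--                        "✦ <code>/work_open</code> — принудительно открыть смену\n"
--                        "✦ <code>/work_close</code> — принудительно закрыть смену\n"
--                        "✦ <code>/reset_control</code> — сбросить счетчик контроля для текущего чата\n"
--                        "✦ <code>/set_media_mbt</code> — установить медиа для MBT (фото/видео)\n"
--                        "✦ <code>/set_media_start</code> — установить медиа для начала смены (фото/видео)\n"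
--                        "✦ <code>/set_media_finish</code> — установить медиа для окончания смены (фото/видео)\n"
--                        "✦ <code>/toggle_info_mbt</code> — вкл/выкл инфо-скрипт для MBT\n"
--                        "✦ <code>/toggle_info_lgi</code> — вкл/выкл инфо-скрипт для LGI\n"
--                        "✦ <code>/toggle_info_tct</code> — вкл/выкл инфо-скрипт для TCT\n")
--     ]
--     status_order = ["user", "operator", "admin", "superadmin"]
--     try:
--         cutoff = status_order.index(status) + 1
--     except ValueError:
--         cutoff = len(sections)
--     return "(｡•̀ ᵕ •́｡) Команды, доступные вам:\n\n" + "".join(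
--         section + "\n" for _, section in sections[:cutoff])
-- ===== Notes on version B (the rewrite author's own statement) =====
-- stated objective: simpler
-- what changed: Replaces A's accumulate-and-break loop over the sections with computing a cutoff index from status_order.index(status)+1 (falling back to all sections for unknown status) and joining the section slice onto the greeting.
import Mathlib
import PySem

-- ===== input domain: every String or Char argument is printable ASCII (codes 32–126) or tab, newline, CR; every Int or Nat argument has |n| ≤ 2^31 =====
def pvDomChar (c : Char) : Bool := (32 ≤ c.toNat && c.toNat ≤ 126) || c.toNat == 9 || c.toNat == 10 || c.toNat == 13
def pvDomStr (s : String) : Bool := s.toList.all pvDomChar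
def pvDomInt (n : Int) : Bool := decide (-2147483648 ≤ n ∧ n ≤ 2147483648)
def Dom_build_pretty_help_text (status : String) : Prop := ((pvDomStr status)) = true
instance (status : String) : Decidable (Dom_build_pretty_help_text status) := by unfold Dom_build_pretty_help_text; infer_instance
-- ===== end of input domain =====

-- B replaces A's accumulate-and-break loop by computing a cutoff index (status_order.index + 1,
-- falling back to all sections for unknown status) and joining the section slice; objective: simpler.

-- ===== PORT A =====
-- shared text constants (identical literals in both Pythons)
def pvSec1 : String := "<u><b>🙋‍♂️ для менеджера Клиента:</b></u>\n✦ <code>/СУММА</code> - запрос суммы для обмена\n<blockquote>примеры:\n<code>/1000000</code> - нужно 1 млн IDR - дать расчет и реквизиты для перевода RUB\n<code>/-500000</code> - нужно вернуть 500000 IDR - дать расчет возврата</blockquote>\n✦ <code>/sos</code> - срочный вызов представителя сервиса\n✦ <code>/control [комментарий при необходимости]</code> - запрос контроля оплаты (с вложением)\n✦ <code>/joke</code> ✦ <code>/meme</code> ✦ <code>/dice</code> ✦ <code>/coin</code> - если будет скучно 😄\n\n✦ <code>/status</code> - просмотр активных запросов\n✦ <code>/report</code> - отчет по всем группам запросов\n✦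 <code>/order_show</code> - просмотр информации по отдельной заявке\n"

def pvSec2 : String := "<u><b>👨‍💻 + для оператора Сервиса:</b></u>\n✦ <code>/bank_new</code> - добавить новые реквизиты на обмен\n✦ <code>/bank_show</code> - показать все действующие реквизиты\n✦ <code>/bank_change</code> - сменить текущие или спец реквизиты\n\n✦ <code>/check_control</code> - отчет по количеству запросов на контроле\n✦ <code>/zombie [order_number]</code> - оживить заявку из архива (timeout → created)\n"

def pvSec3 : String := "<u><b>👨🏻‍💼 + для админа Cервиса:</b></u>\n✦ <code>/transfer [сумма]</code> - подтверждение оплаты ордеров из отчета (с вложением)\n\n✦ <code>/bank_remove</code> - удалить реквизиты навсегда\n✦ <code>/operator_show</code> - показать всех операторов\n✦ <code>/operator_add</code> - назначить оператора сервиса\n✦ <code>/operator_remove</code> - снять права оператора\n\n✦ <code>/rate_show</code> - показать текущие курсы обмена\n✦ <code>/rate_change</code> - сменить текущий основной курс\n⁴⁰⁴<code>/rate_zone_change</code> - cменить зоны (интервалы) обмена\n⁴⁰⁴<code>/rate_coef_change</code> - сменить текущие коэффициенты курсов\n!!! предельная аккуратность при следующей команде:\n✦ <code>/order_change [order_number]</code>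 - изменить статус заявки\n"

def pvSec4 : String := "<u><b>👮 + для супер админа:</b></u>\n✦ <code>/admin_show</code> - показать всех админов сервиса\n✦ <code>/admin_add</code> - добавить админа в сервис\n✦ <code>/admin_remove</code> - удалить админа из сервиса\n✦ <code>/check</code> - информация о чате\n✦ <code>/restart</code> - перезапустить бота\n✦ <code>/worktime</code> - изменить рабочее время смены\n✦ <code>/work_open</code> — принудительно открыть смену\n✦ <code>/work_close</code> — принудительно закрыть смену\n✦ <code>/reset_control</code> — сбросить счетчик контроля для текущего чата\n✦ <code>/set_media_mbt</code> — установить медиа для MBT (фото/видео)\n✦ <code>/set_media_start</code> — установить медиа для начала смены (фото/видео)\n✦ <code>/set_media_finish</code> — установить медиа для окончания смены (фото/видео)\n✦ <code>/toggle_info_mbt</code> — вкл/выкл инфо-скрипт для MBT\n✦ <code>/toggle_info_lgi</code> — вкл/выкл инфо-скрипт для LGI\n✦ <code>/toggle_info_tct</code> — вкл/выкл инфо-скрипт для TCT\n"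

def pvSections : List (String × String) := [("user", pvSec1), ("operator", pvSec2), ("admin", pvSec3), ("superadmin", pvSec4)]

def pvGreeting : String := "(｡•̀ ᵕ •́｡) Команды, доступные вам:\n\n"

def pvStatusOrder : List String := ["user", "operator", "admin", "superadmin"]

-- A's for-loop with break, as structural recursion over the sections list
def pvHelpLoopA (status : String) : List (String × String) → String → String
  | [], text => text
  | (s, sec) :: rest, text =>
    let text' := text ++ (sec ++ "\n")
    if s == status then text' else pvHelpLoopA status rest text'

def build_pretty_help_text (status : String) : String :=
  pvHelpLoopA status pvSections pvGreeting

-- ===== PORT B =====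
def build_pretty_help_text_alt (status : String) : String :=
  let cutoff : Nat :=
    match PySem.List.index? pvStatusOrder status with
    | some i => i + 1
    | none => pvSections.length
  pvGreeting ++ String.join ((pvSections.take cutoff).map (fun p => p.2 ++ "\n"))

-- ===== PRECONDITION & SPEC =====
def Spec_build_pretty_help_text (status : String) (out : String) : Prop := out = build_pretty_help_text_alt status
instance (status : String) (out : String) : Decidable (Spec_build_pretty_help_text status out) := by unfold Spec_build_pretty_help_text; infer_instance

-- ===== CLAIM (what is proved, stated in full; the proofs are below) =====
def Claim_equal_build_pretty_help_text : Prop := ∀ (status : String), Dom_build_pretty_help_text status → Spec_build_pretty_help_text status (build_pretty_help_text status)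

-- ===== LEMMAS AND PROOFS =====

-- ===== VERDICT (by name: the statement is the Claim_ definition above) =====
theorem build_pretty_help_text_spec : Claim_equal_build_pretty_help_text := by
  intro status _
  show build_pretty_help_text status = build_pretty_help_text_alt status
  by_cases h1 : status = "user"
  · subst h1
    simp [build_pretty_help_text, build_pretty_help_text_alt, pvHelpLoopA, pvSections,
      pvStatusOrder, PySem.List.index?, String.join, List.idxOf?, List.findIdx?, List.findIdx?.go, List.take, List.foldl]
  by_cases h2 : status = "operator"
  · subst h2
    simp [build_pretty_help_text, build_pretty_help_text_alt, pvHelpLoopA, pvSections,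
      pvStatusOrder, PySem.List.index?, String.join, List.idxOf?, List.findIdx?, List.findIdx?.go, List.take, List.foldl, String.append_assoc]
  by_cases h3 : status = "admin"
  · subst h3
    simp [build_pretty_help_text, build_pretty_help_text_alt, pvHelpLoopA, pvSections,
      pvStatusOrder, PySem.List.index?, String.join, List.idxOf?, List.findIdx?, List.findIdx?.go, List.take, List.foldl, String.append_assoc]
  by_cases h4 : status = "superadmin"
  · subst h4
    simp [build_pretty_help_text, build_pretty_help_text_alt, pvHelpLoopA, pvSections,
      pvStatusOrder, PySem.List.index?, String.join, List.idxOf?, List.findIdx?, List.findIdx?.go, List.take, List.foldl, String.append_assoc]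
  · have hidx : PySem.List.index? pvStatusOrder status = none := by
      rw [PySem.List.index?_eq_none_iff]
      simp [pvStatusOrder]
      exact ⟨h1, h2, h3, h4⟩
    simp only [build_pretty_help_text, build_pretty_help_text_alt, hidx]
    simp [pvHelpLoopA, pvSections, String.join, List.take, List.foldl, String.append_assoc, beq_iff_eq,
      Ne.symm h1, Ne.symm h2, Ne.symm h3, Ne.symm h4]
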